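-- pv_equiv track=rewrite | github.com/Bluedabade/68_Python_Wed | problem/52.py | group_by_unit_digit
-- ===== SOURCE A (Python) =====
-- def group_by_unit_digit(numbers):
--     result = []
--     for i in range(0,10):
--         result.append([])
--
--     for num in numbers:
--         unit = num % 10
--         result[unit].append(num)
--     return(result)
-- ===== SOURCE B (Python) =====
-- def group_by_unit_digit(numbers):
--     return [[num for num in numbers if num % 10 == digit] for digit in range(10)]
-- ===== Notes on version B (the rewrite author's own statement) =====
-- stated objective: idiomatic
-- what changed: A distributes each number into pre-built buckets in one pass (result[num % 10].append); B builds each bucket directly with a nested comprehension, scanning the list once per digit 0..9.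
import Mathlib
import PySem

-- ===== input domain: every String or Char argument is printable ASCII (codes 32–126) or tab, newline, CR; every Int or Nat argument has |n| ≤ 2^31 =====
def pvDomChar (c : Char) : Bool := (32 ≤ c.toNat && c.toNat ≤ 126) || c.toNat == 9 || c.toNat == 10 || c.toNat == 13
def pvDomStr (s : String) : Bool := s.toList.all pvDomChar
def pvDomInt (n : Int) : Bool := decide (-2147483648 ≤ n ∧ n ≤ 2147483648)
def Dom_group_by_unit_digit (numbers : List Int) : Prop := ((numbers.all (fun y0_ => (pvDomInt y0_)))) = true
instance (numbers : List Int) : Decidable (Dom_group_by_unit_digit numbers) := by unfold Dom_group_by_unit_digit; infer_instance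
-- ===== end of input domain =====

-- B replaces A's single distributing pass (result[num % 10].append) by an idiomatic
-- nested comprehension building each digit's bucket by filtering the list.


-- ===== PORT A =====
-- result = [] ; for i in range(0,10): result.append([])  — ten empty buckets
-- for num in numbers: unit = num % 10 ; result[unit].append(num)
def group_by_unit_digit (numbers : List Int) : List (List Int) :=
  let result := (PySem.List.pyRange 0 10 1).foldl (fun r _ => r ++ [([] : List Int)]) []
  numbers.foldl (fun r num =>
    let unit := PySem.Int.mod num 10
    r.modify unit.toNat (fun b => b ++ [num])) result

-- ===== PORT B =====
-- [[num for num in numbers if num % 10 == digit] for digit in range(10)]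
def group_by_unit_digit_alt (numbers : List Int) : List (List Int) :=
  (PySem.List.pyRange 0 10 1).map
    (fun digit => numbers.filter (fun num => PySem.Int.mod num 10 == digit))

-- ===== PRECONDITION & SPEC =====
def Spec_group_by_unit_digit (numbers : List Int) (out : List (List Int)) : Prop := out = group_by_unit_digit_alt numbers
instance (numbers : List Int) (out : List (List Int)) : Decidable (Spec_group_by_unit_digit numbers out) := by unfold Spec_group_by_unit_digit; infer_instance

-- ===== CLAIM (what is proved, stated in full; the proofs are below) =====
def Claim_equal_group_by_unit_digit : Prop := ∀ (numbers : List Int), Dom_group_by_unit_digit numbers → Spec_group_by_unit_digit numbers (group_by_unit_digit numbers)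

-- ===== LEMMAS AND PROOFS =====

-- modify on a map over an (injective position = value) range
theorem pv_modify_map_range (k : ℕ) (g : ℕ → List Int) (i : ℕ) (f : List Int → List Int) :
    ((List.range k).map g).modify i f
      = (List.range k).map (fun d => if d = i then f (g d) else g d) := by
  apply List.ext_getElem
  · simp
  · intro j h1 h2
    simp only [List.getElem_modify, List.getElem_map, List.getElem_range]
    by_cases h : i = j <;> simp [h, eq_comm]

theorem pv_mod10_bounds (n : Int) : 0 ≤ PySem.Int.mod n 10 ∧ PySem.Int.mod n 10 < 10 := by
  rw [PySem.Int.mod_eq_emod_of_pos (by norm_num)]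
  exact ⟨Int.emod_nonneg n (by norm_num), Int.emod_lt_of_pos n (by norm_num)⟩

-- loop invariant: folding A's body over nums from buckets (map g (range 10))
theorem pv_fold_inv (nums : List Int) (g : ℕ → List Int) :
    nums.foldl (fun r num =>
        r.modify (PySem.Int.mod num 10).toNat (fun b => b ++ [num])) ((List.range 10).map g)
      = (List.range 10).map
          (fun d => g d ++ nums.filter (fun num => PySem.Int.mod num 10 == (d : Int))) := by
  induction nums generalizing g with
  | nil => simp
  | cons n rest ih =>
    simp only [List.foldl_cons, pv_modify_map_range]
    rw [ih]
    apply List.map_congr_left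
    intro d hd
    have hm := pv_mod10_bounds n
    rw [PySem.Int.mod_eq_emod_of_pos (show (0:Int) < 10 by norm_num)] at hm
    simp only [PySem.Int.mod_eq_emod_of_pos (show (0:Int) < 10 by norm_num), List.filter_cons]
    by_cases h : n % 10 = (d : Int)
    · have hd' : d = (n % 10).toNat := by omega
      rw [if_pos hd']
      simp [h]
    · have hd' : d ≠ (n % 10).toNat := by omega
      rw [if_neg hd']
      simp [h]

-- ===== VERDICT (by name: the statement is the Claim_ definition above) =====
theorem group_by_unit_digit_spec : Claim_equal_group_by_unit_digit := by
  intro numbers _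
  show group_by_unit_digit numbers = group_by_unit_digit_alt numbers
  unfold group_by_unit_digit group_by_unit_digit_alt
  have h0 : (PySem.List.pyRange 0 10 1).foldl (fun r _ => r ++ [([] : List Int)]) []
      = (List.range 10).map (fun _ => ([] : List Int)) := by decide
  have h1 : PySem.List.pyRange 0 10 1 = (List.range 10).map Int.ofNat := by decide
  rw [h0, pv_fold_inv, h1, List.map_map]
  simp [Function.comp]
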